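-- pv_equiv track=rewrite | github.com/juniper-j/jungle-log | algorithms-study/도영이가_만든_맛있는_음식.py | find_xy
-- ===== SOURCE A (Python) =====
-- def is_power_of_two(n):
--     return n > 0 and (n & (n - 1)) == 0
--
-- def find_xy(m):
--     for x in range(61):
--         pow_x = 1 << x
--         if pow_x > m:
--             break
--         remaining = m - pow_x
--         if is_power_of_two(remaining):
--             y = (remaining).bit_length() - 1
--             if x <= y:
--                 return x, y
--     return None
-- ===== SOURCE B (Python) =====
-- def find_xy(m):
--     if m <= 0:
--         return None
--     k = m.bit_length() - 1          # highest set bit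
--     r = m - (1 << k)                # m with its highest bit cleared
--     if r == 0:                      # m is a power of two
--         return (k - 1, k - 1) if k >= 1 else None
--     j = r.bit_length() - 1
--     if r == 1 << j:                 # exactly two set bits: positions j < k
--         return (j, k)
--     return None
-- ===== Notes on version B (the rewrite author's own statement) =====
-- stated objective: simpler
-- what changed: Replaces A's bounded scan over candidate low exponents (trying each x and testing m-2^x for power-of-two with bit tricks) with a direct closed-form read of m's binary form: clear the highest bit, then classify the remainder as zero, a single power of two, or anything else.
import Mathlib
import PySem

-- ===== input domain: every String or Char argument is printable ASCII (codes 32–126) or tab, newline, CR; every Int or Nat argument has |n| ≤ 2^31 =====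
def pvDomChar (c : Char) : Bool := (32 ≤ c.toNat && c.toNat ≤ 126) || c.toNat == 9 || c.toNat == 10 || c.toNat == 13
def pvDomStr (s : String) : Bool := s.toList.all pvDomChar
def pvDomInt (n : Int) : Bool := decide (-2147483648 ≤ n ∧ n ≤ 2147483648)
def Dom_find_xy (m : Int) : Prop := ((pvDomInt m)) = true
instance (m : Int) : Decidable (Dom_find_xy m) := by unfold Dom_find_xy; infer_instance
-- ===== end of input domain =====

-- B reads the answer directly off m's binary form (clear the highest bit, classify the remainder)
-- instead of A's bounded scan over candidate low exponents; objective: simpler.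

-- ===== PORT A =====
def is_power_of_two (n : Int) : Bool := decide (n > 0) && (PySem.Int.band n (n - 1) == 0)

-- the for-loop of A over range(61), with `break` as an immediate `none`
def find_xy_loop (m : Int) : List Int → Option (Int × Int)
  | [] => none
  | x :: rest =>
    let pow_x : Int := (1 : Int) <<< x.toNat   -- x ≥ 0 throughout range(61), so `.toNat` is exact
    if pow_x > m then none
    else
      let remaining := m - pow_x
      if is_power_of_two remaining then
        let y : Int := (PySem.Int.bitLength remaining : Int) - 1
        if x ≤ y then some (x, y) else find_xy_loop m rest
      else find_xy_loop m rest

def find_xy (m : Int) : Option (Int × Int) := find_xy_loop m (PySem.List.pyRange 0 61 1)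

-- ===== PORT B =====
def find_xy_alt (m : Int) : Option (Int × Int) :=
  if m ≤ 0 then none
  else
    let k : Int := (PySem.Int.bitLength m : Int) - 1
    let r : Int := m - ((1 : Int) <<< k.toNat)   -- k ≥ 0 since m ≥ 1
    if r = 0 then (if k ≥ 1 then some (k - 1, k - 1) else none)
    else
      let j : Int := (PySem.Int.bitLength r : Int) - 1
      if r = (1 : Int) <<< j.toNat then some (j, k) else none

-- ===== PRECONDITION & SPEC =====
def Spec_find_xy (m : Int) (out : Option (Int × Int)) : Prop := out = find_xy_alt m
instance (m : Int) (out : Option (Int × Int)) : Decidable (Spec_find_xy m out) := by unfold Spec_find_xy; infer_instance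

-- ===== CLAIM (what is proved, stated in full; the proofs are below) =====
def Claim_equal_find_xy : Prop := ∀ (m : Int), Dom_find_xy m → Spec_find_xy m (find_xy m)

-- ===== LEMMAS AND PROOFS =====

-- `n &&& (n-1) = 0` over Nat characterises powers of two (for n > 0)
theorem nat_land_pred_even (b : Nat) : (2 * b) &&& (2 * b - 1) = 2 * (b &&& (b - 1)) := by
  rcases Nat.eq_zero_or_pos b with hb | hb
  · simp [hb]
  apply Nat.eq_of_testBit_eq
  intro i
  cases i with
  | zero => simp [Nat.testBit_zero, Nat.mul_mod_right]
  | succ i =>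
    rw [Nat.testBit_land, Nat.testBit_succ, Nat.testBit_succ, Nat.testBit_succ,
      Nat.mul_div_cancel_left _ (by norm_num : 0 < 2),
      Nat.mul_div_cancel_left _ (by norm_num : 0 < 2),
      show (2 * b - 1) / 2 = b - 1 by omega, ← Nat.testBit_land]

theorem nat_land_pred_odd (b : Nat) : (2 * b + 1) &&& (2 * b) = 2 * b := by
  apply Nat.eq_of_testBit_eq
  intro i
  cases i with
  | zero => simp [Nat.testBit_zero, Nat.mul_mod_right]
  | succ i =>
    rw [Nat.testBit_land, Nat.testBit_succ, Nat.testBit_succ,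
      show (2 * b + 1) / 2 = b by omega,
      Nat.mul_div_cancel_left _ (by norm_num : 0 < 2), Bool.and_self]

theorem nat_pow2_iff (a : Nat) (ha : 0 < a) : (a &&& (a - 1)) = 0 ↔ ∃ k : Nat, a = 2 ^ k := by
  induction a using Nat.strong_induction_on with
  | _ a ih =>
    match ha' : a, ha with
    | 1, _ => exact ⟨fun _ => ⟨0, rfl⟩, fun _ => by decide⟩
    | (n+2), _ =>
      rcases Nat.even_or_odd (n+2) with he | ho
      · obtain ⟨b, hb⟩ := he
        have hb2 : n + 2 = 2 * b := by omega
        have hbpos : 0 < b := by omega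
        rw [hb2, nat_land_pred_even]
        constructor
        · intro h
          obtain ⟨k, hk⟩ := (ih b (by omega) hbpos).1 (by omega)
          exact ⟨k + 1, by rw [hk]; ring⟩
        · rintro ⟨k, hk⟩
          match k with
          | 0 => omega
          | k+1 =>
            have : b = 2 ^ k := by rw [pow_succ] at hk; omega
            have := (ih b (by omega) hbpos).2 ⟨k, this⟩
            omega
      · obtain ⟨b, hb⟩ := ho
        have hb2 : n + 2 = 2 * b + 1 := by omega
        have : (n + 2) &&& (n + 2 - 1) = 2 * b := by
          rw [hb2, show 2 * b + 1 - 1 = 2 * b by omega, nat_land_pred_odd]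
        rw [this]
        constructor
        · intro h; omega
        · rintro ⟨k, hk⟩
          match k with
          | 0 => omega
          | k+1 => rw [pow_succ] at hk; omega

theorem isPow_iff (r : Int) : is_power_of_two r = true ↔ ∃ j : Nat, r = 2 ^ j := by
  rw [is_power_of_two]
  constructor
  · intro h
    simp only [Bool.and_eq_true, decide_eq_true_eq, beq_iff_eq] at h
    obtain ⟨hr, hband⟩ := h
    rw [PySem.Int.band_of_nonneg (by omega) (by omega)] at hband
    have : r.toNat &&& (r - 1).toNat = 0 := by exact_mod_cast hband
    rw [show (r - 1).toNat = r.toNat - 1 by omega] at this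
    obtain ⟨k, hk⟩ := (nat_pow2_iff r.toNat (by omega)).1 this
    refine ⟨k, ?_⟩
    rw [show ((2:Int) ^ k) = ((2 ^ k : Nat) : Int) by push_cast; ring]
    omega
  · rintro ⟨j, rfl⟩
    have hpos : (0 : Int) < 2 ^ j := by positivity
    simp only [Bool.and_eq_true, decide_eq_true_eq, beq_iff_eq]
    refine ⟨hpos, ?_⟩
    rw [PySem.Int.band_of_nonneg (by omega) (by omega)]
    have h1 : ((2 : Int) ^ j).toNat = 2 ^ j := by
      rw [show (2 : Int) ^ j = ((2 ^ j : Nat) : Int) by push_cast; ring]; exact Int.toNat_natCast _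
    have h2 : ((2 : Int) ^ j - 1).toNat = 2 ^ j - 1 := by omega
    rw [h1, h2, (nat_pow2_iff (2 ^ j) (by positivity)).2 ⟨j, rfl⟩]
    rfl

theorem isPow_false (r : Int) (h : ∀ j : Nat, r ≠ 2 ^ j) : is_power_of_two r = false := by
  cases hb : is_power_of_two r with
  | false => rfl
  | true =>
    obtain ⟨j, hj⟩ := (isPow_iff r).1 hb
    exact absurd hj (h j)

theorem bitLength_eq (r : Int) (c : Nat) (h1 : 2 ^ c ≤ r.natAbs) (h2 : r.natAbs < 2 ^ (c + 1)) :
    PySem.Int.bitLength r = c + 1 := by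
  have hne : r ≠ 0 := by
    intro h; rw [h] at h1; simp only [Int.natAbs_zero] at h1
    have := Nat.one_le_two_pow (n := c); omega
  have hlo := PySem.Int.two_pow_bitLength_le r hne
  have hhi := PySem.Int.lt_two_pow_bitLength r
  have hL1 : c < PySem.Int.bitLength r :=
    (Nat.pow_lt_pow_iff_right (by norm_num)).1 (lt_of_le_of_lt h1 hhi)
  have hL2 : PySem.Int.bitLength r - 1 < c + 1 :=
    (Nat.pow_lt_pow_iff_right (by norm_num)).1 (lt_of_le_of_lt hlo h2)
  omega

theorem bitLength_pow (j : Nat) : PySem.Int.bitLength ((2 : Int) ^ j) = j + 1 := by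
  apply bitLength_eq
  · rw [show ((2:Int) ^ j) = ((2 ^ j : Nat) : Int) by push_cast; ring, Int.natAbs_natCast]
  · rw [show ((2:Int) ^ j) = ((2 ^ j : Nat) : Int) by push_cast; ring, Int.natAbs_natCast]
    exact Nat.pow_lt_pow_right (by norm_num) (by omega)

theorem odd_factor_eq_one (x j c : Nat) (hodd : c % 2 = 1) (h : 2 ^ x * c = 2 ^ j) : c = 1 := by
  have hdvd : c ∣ 2 ^ j := ⟨2 ^ x, by rw [← h]; ring⟩
  have hcop : Nat.Coprime c 2 := by
    have h2 : ¬ (2 ∣ c) := by omega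
    exact ((Nat.prime_two.coprime_iff_not_dvd).mpr h2).symm
  exact (hcop.pow_right j).eq_one_of_dvd hdvd

theorem sub_pow_not_pow (n x K : Nat) (hx : x + 2 ≤ K) (hn : n = 2 ^ K) (j : Nat) :
    n - 2 ^ x ≠ 2 ^ j := by
  intro h
  have hfac : n - 2 ^ x = 2 ^ x * (2 ^ (K - x) - 1) := by
    rw [hn, Nat.mul_sub, mul_one, ← Nat.pow_add]
    congr 2; omega
  have hodd : (2 ^ (K - x) - 1) % 2 = 1 := by
    have h2 : 2 ^ (K - x) % 2 = 0 := by
      have : K - x = (K - x - 1) + 1 := by omega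
      rw [this, pow_succ]; omega
    have := Nat.one_le_two_pow (n := K - x); omega
  have := odd_factor_eq_one x j _ hodd (by rw [← hfac, h])
  have h3 : 2 ^ 2 ≤ 2 ^ (K - x) := Nat.pow_le_pow_right (by norm_num) (by omega)
  omega

theorem sub_pow_not_pow2 (n x a K : Nat) (hxa : x < a) (haK : a < K) (hn : n = 2 ^ a + 2 ^ K)
    (j : Nat) : n - 2 ^ x ≠ 2 ^ j := by
  intro h
  have hfac : n - 2 ^ x = 2 ^ x * (2 ^ (a - x) + 2 ^ (K - x) - 1) := by
    rw [hn, Nat.mul_sub, Nat.mul_add, mul_one, ← Nat.pow_add, ← Nat.pow_add]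
    congr 3 <;> omega
  have ha2 : 2 ^ (a - x) % 2 = 0 := by
    have : a - x = (a - x - 1) + 1 := by omega
    rw [this, pow_succ]; omega
  have hK2 : 2 ^ (K - x) % 2 = 0 := by
    have : K - x = (K - x - 1) + 1 := by omega
    rw [this, pow_succ]; omega
  have hodd : (2 ^ (a - x) + 2 ^ (K - x) - 1) % 2 = 1 := by
    have := Nat.one_le_two_pow (n := a - x); have := Nat.one_le_two_pow (n := K - x); omega
  have := odd_factor_eq_one x j _ hodd (by rw [← hfac, h])
  have h3 : 2 ^ 1 ≤ 2 ^ (a - x) := Nat.pow_le_pow_right (by norm_num) (by omega)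
  have h4 : 2 ^ 1 ≤ 2 ^ (K - x) := Nat.pow_le_pow_right (by norm_num) (by omega)
  omega

theorem pow_range_unique (n K J : Nat) (h1 : 2 ^ K ≤ n) (h2 : n < 2 ^ (K + 1))
    (h3 : 2 ^ J ≤ n) (h4 : n < 2 ^ (J + 1)) : K = J := by
  have hKJ : K < J + 1 := (Nat.pow_lt_pow_iff_right (by norm_num)).1 (lt_of_le_of_lt h1 h4)
  have hJK : J < K + 1 := (Nat.pow_lt_pow_iff_right (by norm_num)).1 (lt_of_le_of_lt h3 h2)
  omega

theorem shl_one_cast (t : Nat) : (1 : Int) <<< t = ((2 ^ t : Nat) : Int) := by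
  rw [Int.shiftLeft_eq]; push_cast; ring

-- loop characterisations
theorem loop_none (m : Int) (l : List Int)
    (h : ∀ x ∈ l, (1 : Int) <<< x.toNat ≤ m →
      ¬(is_power_of_two (m - ((1 : Int) <<< x.toNat)) = true ∧
        x ≤ (PySem.Int.bitLength (m - ((1 : Int) <<< x.toNat)) : Int) - 1)) :
    find_xy_loop m l = none := by
  induction l with
  | nil => rfl
  | cons x rest ih =>
    have hx := h x (List.mem_cons_self)
    by_cases h1 : (1 : Int) <<< x.toNat > m
    · simp only [find_xy_loop, if_pos h1]
    · have hx' := hx (by omega)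
      by_cases h2 : is_power_of_two (m - ((1 : Int) <<< x.toNat)) = true
      · have h3 : ¬(x ≤ (PySem.Int.bitLength (m - ((1 : Int) <<< x.toNat)) : Int) - 1) :=
          fun hy => hx' ⟨h2, hy⟩
        simp only [find_xy_loop, if_neg h1, if_pos h2, if_neg h3]
        exact ih (fun y hy => h y (List.mem_cons_of_mem _ hy))
      · simp only [find_xy_loop, if_neg h1, if_neg h2]
        exact ih (fun y hy => h y (List.mem_cons_of_mem _ hy))

theorem loop_found (m : Int) (t : Int) (l1 l2 : List Int)
    (h1 : ∀ x ∈ l1, (1 : Int) <<< x.toNat ≤ m ∧ is_power_of_two (m - ((1 : Int) <<< x.toNat)) = false)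
    (ht : (1 : Int) <<< t.toNat ≤ m) (hp : is_power_of_two (m - ((1 : Int) <<< t.toNat)) = true)
    (hty : t ≤ (PySem.Int.bitLength (m - ((1 : Int) <<< t.toNat)) : Int) - 1) :
    find_xy_loop m (l1 ++ t :: l2) =
      some (t, (PySem.Int.bitLength (m - ((1 : Int) <<< t.toNat)) : Int) - 1) := by
  induction l1 with
  | nil =>
    simp only [List.nil_append, find_xy_loop, if_neg (by omega : ¬((1 : Int) <<< t.toNat > m)),
      if_pos hp, if_pos hty]
  | cons x rest ih =>
    obtain ⟨hxm, hxp⟩ := h1 x (List.mem_cons_self)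
    simp only [List.cons_append, find_xy_loop, if_neg (by omega : ¬((1 : Int) <<< x.toNat > m)),
      if_neg (by simp [hxp] : ¬(is_power_of_two (m - ((1 : Int) <<< x.toNat)) = true))]
    exact ih (fun y hy => h1 y (List.mem_cons_of_mem _ hy))

-- A's loop succeeds at the first x whose remainder m - 2^x is a power of two
theorem main_eq (m : Int) (hdom : -2147483648 ≤ m ∧ m ≤ 2147483648) :
    find_xy m = find_xy_alt m := by
  by_cases hm0 : m ≤ 0
  · have hB : find_xy_alt m = none := by rw [find_xy_alt, if_pos hm0]
    have hA : find_xy m = none := by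
      apply loop_none
      intro x hx hpow
      exfalso
      rw [shl_one_cast] at hpow
      have h1 : (1 : Nat) ≤ 2 ^ x.toNat := Nat.one_le_two_pow
      have h2 : (1 : Int) ≤ ((2 ^ x.toNat : Nat) : Int) := by exact_mod_cast h1
      omega
    rw [hA, hB]
  · push_neg at hm0
    by_cases hm1 : m = 1
    · subst hm1; decide
    · have hm2 : 2 ≤ m := by omega
      set n := m.toNat with hn
      have hmn : m = (n : Int) := by omega
      have habs : m.natAbs = n := by omega
      set L := PySem.Int.bitLength m with hL
      have hlo : 2 ^ (L - 1) ≤ n := habs ▸ PySem.Int.two_pow_bitLength_le m (by omega)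
      have hhi : n < 2 ^ L := habs ▸ PySem.Int.lt_two_pow_bitLength m
      have hn2 : 2 ≤ n := by omega
      have hL2 : 2 ≤ L := by
        by_contra hc
        have h1 : (2 : Nat) ^ L ≤ 2 ^ 1 := Nat.pow_le_pow_right (by norm_num) (by omega)
        norm_num at h1; omega
      set K := L - 1 with hK
      have hKL : L = K + 1 := by omega
      have hK1 : 1 ≤ K := by omega
      have hloK : 2 ^ K ≤ n := hlo
      have hhiK : n < 2 ^ (K + 1) := by rw [← hKL]; exact hhi
      have hhiK2 : n < 2 * 2 ^ K := by rw [← pow_succ']; exact hhiK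
      have hn31 : n ≤ 2 ^ 31 := by norm_num; omega
      have hK31 : K ≤ 31 := by
        by_contra hc; push_neg at hc
        have h1 : 2 ^ 32 ≤ 2 ^ K := Nat.pow_le_pow_right (by norm_num) (by omega)
        have := le_trans h1 (le_trans hloK hn31)
        norm_num at this
      set R := n - 2 ^ K with hR
      have hRn : n = 2 ^ K + R := by omega
      have hRlt : R < 2 ^ K := by omega
      have htoK : ((L : Int) - 1).toNat = K := by omega
      have hrval : m - ((1 : Int) <<< ((L : Int) - 1).toNat) = (R : Int) := by
        rw [htoK, shl_one_cast, hmn]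
        push_cast [hRn]
        ring
      by_cases hR0 : R = 0
      · -- m is the power of two 2^K: both return (K-1, K-1)
        have hnP : n = 2 ^ K := by omega
        have hB : find_xy_alt m = some ((K : Int) - 1, (K : Int) - 1) := by
          simp only [find_xy_alt, ← hL]
          rw [if_neg (by omega), hrval, if_pos (by exact_mod_cast congrArg Nat.cast hR0),
            if_pos (by omega : ((L : Int) - 1) ≥ 1)]
          simp only [Option.some.injEq, Prod.mk.injEq]
          constructor <;> omega
        have hdec : PySem.List.pyRange 0 61 1 =
            PySem.List.pyRange 0 ((K : Int) - 1) 1 ++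
              ((K : Int) - 1) :: PySem.List.pyRange ((K : Int) - 1 + 1) 61 1 := by
          rw [PySem.List.pyRange_one_append 0 ((K : Int) - 1) 61 (by omega) (by omega),
            PySem.List.pyRange_one_cons (by omega : ((K : Int) - 1) < 61)]
        have htt : (((K : Int) - 1)).toNat = K - 1 := by omega
        have hrem : m - ((1 : Int) <<< (((K : Int) - 1)).toNat) = (2 : Int) ^ (K - 1) := by
          rw [htt, shl_one_cast, hmn]
          have : n - 2 ^ (K - 1) = 2 ^ (K - 1) := by
            have : 2 ^ K = 2 * 2 ^ (K - 1) := by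
              rw [← pow_succ']; congr 1; omega
            omega
          have hpk : ((2 : Int) ^ (K - 1)) = ((2 ^ (K - 1) : Nat) : Int) := by push_cast; ring
          have hle : 2 ^ (K - 1) ≤ n := le_trans (Nat.pow_le_pow_right (by norm_num) (by omega)) hloK
          rw [hpk]; omega
        have hA : find_xy m = some ((K : Int) - 1, (K : Int) - 1) := by
          rw [find_xy, hdec, loop_found]
          · rw [hrem, bitLength_pow]
            simp only [Option.some.injEq, Prod.mk.injEq]
            constructor <;> push_cast <;> omega
          · intro x hxmem
            rw [PySem.List.mem_pyRange_one] at hxmem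
            have hxlt : x.toNat < K - 1 := by omega
            have hple : (2 : Nat) ^ x.toNat ≤ n :=
              le_trans (Nat.pow_le_pow_right (by norm_num) (by omega)) hloK
            have hshx : (1 : Int) <<< x.toNat = ((2 ^ x.toNat : Nat) : Int) := shl_one_cast _
            constructor
            · rw [hshx, hmn]; exact_mod_cast hple
            · apply isPow_false
              intro j hj
              rw [hshx, hmn, show ((n : Int) - ((2 ^ x.toNat : Nat) : Int)) =
                (((n - 2 ^ x.toNat : Nat)) : Int) by omega,
                show ((2 : Int) ^ j) = ((2 ^ j : Nat) : Int) by push_cast; ring] at hj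
              exact sub_pow_not_pow n x.toNat K (by omega) hnP j (by exact_mod_cast hj)
          · rw [htt, shl_one_cast, hmn]
            exact_mod_cast le_trans (Nat.pow_le_pow_right (by norm_num) (by omega)) hloK
          · rw [hrem]; exact (isPow_iff _).2 ⟨K - 1, rfl⟩
          · rw [hrem, bitLength_pow]; push_cast; omega
        rw [hA, hB]
      · by_cases hpow : ∃ a : Nat, R = 2 ^ a
        · -- m has exactly two set bits, at a < K: both return (a, K)
          obtain ⟨a, ha⟩ := hpow
          have haK : a < K := by
            have h1 : (2 : Nat) ^ a < 2 ^ K := by rw [← ha]; exact hRlt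
            exact (Nat.pow_lt_pow_iff_right (by norm_num)).1 h1
          have hncast : (R : Int) = (2 : Int) ^ a := by rw [ha]; push_cast; ring
          have hB : find_xy_alt m = some ((a : Int), (K : Int)) := by
            simp only [find_xy_alt, ← hL]
            rw [if_neg (by omega), hrval]
            rw [if_neg (by exact_mod_cast hR0), hncast, bitLength_pow]
            rw [if_pos (by rw [show ((((a + 1 : Nat)) : Int) - 1).toNat = a by omega, shl_one_cast]; push_cast; ring)]
            simp only [Option.some.injEq, Prod.mk.injEq]
            constructor <;> push_cast <;> omega
          have hdec : PySem.List.pyRange 0 61 1 =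
              PySem.List.pyRange 0 (a : Int) 1 ++
                (a : Int) :: PySem.List.pyRange ((a : Int) + 1) 61 1 := by
            rw [PySem.List.pyRange_one_append 0 (a : Int) 61 (by omega) (by omega),
              PySem.List.pyRange_one_cons (by omega : ((a : Int)) < 61)]
          have hrem : m - ((1 : Int) <<< ((a : Int)).toNat) = (2 : Int) ^ K := by
            rw [Int.toNat_natCast, shl_one_cast, hmn]
            have hpk : ((2 : Int) ^ K) = ((2 ^ K : Nat) : Int) := by push_cast; ring
            have hle : (2 : Nat) ^ a ≤ n := by omega
            rw [hpk]; omega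
          have hA : find_xy m = some ((a : Int), (K : Int)) := by
            rw [find_xy, hdec, loop_found]
            · rw [hrem, bitLength_pow]
              simp only [Option.some.injEq, Prod.mk.injEq]
              constructor <;> push_cast <;> omega
            · intro x hxmem
              rw [PySem.List.mem_pyRange_one] at hxmem
              have hxlt : x.toNat < a := by omega
              have hple : (2 : Nat) ^ x.toNat ≤ n :=
                le_trans (Nat.pow_le_pow_right (by norm_num) (by omega)) hloK
              have hshx : (1 : Int) <<< x.toNat = ((2 ^ x.toNat : Nat) : Int) := shl_one_cast _
              constructor
              · rw [hshx, hmn]; exact_mod_cast hple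
              · apply isPow_false
                intro j hj
                rw [hshx, hmn, show ((n : Int) - ((2 ^ x.toNat : Nat) : Int)) =
                  (((n - 2 ^ x.toNat : Nat)) : Int) by omega,
                  show ((2 : Int) ^ j) = ((2 ^ j : Nat) : Int) by push_cast; ring] at hj
                exact sub_pow_not_pow2 n x.toNat a K hxlt haK (by omega) j (by exact_mod_cast hj)
            · rw [Int.toNat_natCast, shl_one_cast, hmn]
              exact_mod_cast (by omega : 2 ^ a ≤ n)
            · rw [hrem]; exact (isPow_iff _).2 ⟨K, rfl⟩
            · rw [hrem, bitLength_pow]; push_cast; omega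
          rw [hA, hB]
        · -- m has three or more set bits: both return none
          have hB : find_xy_alt m = none := by
            simp only [find_xy_alt, ← hL]
            rw [if_neg (by omega), hrval, if_neg (by exact_mod_cast hR0), if_neg]
            intro hc
            rw [shl_one_cast] at hc
            exact hpow ⟨_, by exact_mod_cast hc⟩
          have hA : find_xy m = none := by
            apply loop_none
            intro x hxmem hple hcond
            obtain ⟨hip, _⟩ := hcond
            rw [PySem.List.mem_pyRange_one] at hxmem
            obtain ⟨j, hj⟩ := (isPow_iff _).1 hip
            rw [shl_one_cast] at hple hj
            have hxle : (2 : Nat) ^ x.toNat ≤ n := by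
              rw [hmn] at hple; exact_mod_cast hple
            rw [hmn, show ((n : Int) - ((2 ^ x.toNat : Nat) : Int)) =
              (((n - 2 ^ x.toNat : Nat)) : Int) by omega,
              show ((2 : Int) ^ j) = ((2 ^ j : Nat) : Int) by push_cast; ring] at hj
            have hjn : n - 2 ^ x.toNat = 2 ^ j := by exact_mod_cast hj
            have hsum : n = 2 ^ x.toNat + 2 ^ j := by omega
            set xt := x.toNat with hxt
            rcases lt_trichotomy xt j with hc | hc | hc
            · -- low bit xt, high bit j ⇒ K = j and R = 2^xt, contradicting hpow
              have h1 : (2 : Nat) ^ xt < 2 ^ j := Nat.pow_lt_pow_right (by norm_num) hc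
              have h2 : n < 2 ^ (j + 1) := by rw [pow_succ]; omega
              have hKj : K = j := pow_range_unique n K j hloK hhiK (by rw [hsum]; exact Nat.le_add_left _ _) h2
              have hpe : (2 : Nat) ^ K = 2 ^ j := by rw [hKj]
              exact hpow ⟨xt, by omega⟩
            · -- xt = j ⇒ n = 2^(xt+1) ⇒ R = 0, contradicting hR0
              subst hc
              have h1 : n = 2 ^ (xt + 1) := by rw [pow_succ]; omega
              have h2 : n < 2 ^ (xt + 1 + 1) := by
                rw [h1]; exact Nat.pow_lt_pow_right (by norm_num) (by omega)
              have hKx : K = xt + 1 := pow_range_unique n K (xt + 1) hloK hhiK (le_of_eq h1.symm) h2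
              have hpe : (2 : Nat) ^ K = 2 ^ (xt + 1) := by rw [hKx]
              omega
            · -- low bit j, high bit xt ⇒ K = xt and R = 2^j, contradicting hpow
              have h1 : (2 : Nat) ^ j < 2 ^ xt := Nat.pow_lt_pow_right (by norm_num) hc
              have h2 : n < 2 ^ (xt + 1) := by rw [pow_succ]; omega
              have hKx : K = xt := pow_range_unique n K xt hloK hhiK (by rw [hsum]; exact Nat.le_add_right _ _) h2
              have hpe : (2 : Nat) ^ K = 2 ^ xt := by rw [hKx]
              exact hpow ⟨j, by omega⟩
          rw [hA, hB]

-- ===== VERDICT (by name: the statement is the Claim_ definition above) =====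
theorem find_xy_spec : Claim_equal_find_xy := by
  intro m hdom
  unfold Dom_find_xy pvDomInt at hdom
  rw [decide_eq_true_eq] at hdom
  exact main_eq m hdom
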